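-- pv_equiv track=rewrite | github.com/GolkoNadia/HolkoPMO61 | DecisionTreeProgram/myFunctions.py | removeNoneValue
-- ===== SOURCE A (Python) =====
-- def removeNoneValue(predictList, actualList):
--     lstIndex = []
--     for i in range(0, len(predictList)):
--         if predictList[i] == None:
--             lstIndex.append(i)
--     predictListWithoutNone = []
--     actualListWithoutNone = []
--     result = {'prediction': predictListWithoutNone, 'actual': actualListWithoutNone}
--     for i in range(0, len(predictList)):
--         if i not in lstIndex:
--             predictListWithoutNone.append(predictList[i])
--             actualListWithoutNone.append(actualList[i])
--     return result
-- ===== SOURCE B (Python) =====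
-- def removeNoneValue(predictList, actualList):
--     prediction = [p for p in predictList if p != None]
--     actual = [actualList[i] for i, p in enumerate(predictList) if p != None]
--     return {'prediction': prediction, 'actual': actual}
-- ===== Notes on version B (the rewrite author's own statement) =====
-- stated objective: faster
-- what changed: Two declarative comprehensions (a filter of the predictions, and an enumerate-driven gather of the matching actuals) replace A's two imperative passes with the lstIndex table and its O(k) 'i not in lstIndex' membership scan.
import Mathlib
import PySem

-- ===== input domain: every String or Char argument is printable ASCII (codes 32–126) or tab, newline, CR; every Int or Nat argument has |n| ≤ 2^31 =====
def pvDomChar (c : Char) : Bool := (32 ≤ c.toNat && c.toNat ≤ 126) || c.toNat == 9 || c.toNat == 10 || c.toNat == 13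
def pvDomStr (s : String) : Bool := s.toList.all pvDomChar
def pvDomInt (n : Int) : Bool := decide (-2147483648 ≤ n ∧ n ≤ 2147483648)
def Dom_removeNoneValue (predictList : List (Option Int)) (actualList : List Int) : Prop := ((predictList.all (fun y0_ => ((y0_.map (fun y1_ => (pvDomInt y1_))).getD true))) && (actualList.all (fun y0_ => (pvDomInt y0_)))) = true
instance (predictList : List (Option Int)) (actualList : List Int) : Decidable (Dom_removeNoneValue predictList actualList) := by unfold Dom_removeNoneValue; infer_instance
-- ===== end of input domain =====

-- B replaces A's two imperative passes (None-index table + 'i not in lstIndex' scan) by two declarative comprehensions (filter + enumerate gather).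

-- ===== PORT A =====
-- Two passes: first collect the indices of None entries, then copy the entries
-- whose index is not in that list.  pyGetD is exact here: the loop index i is
-- drawn from range(len(predictList)), and Pre_ keeps i in range for actualList.
def removeNoneValue (predictList : List (Option Int)) (actualList : List Int) : List (String × List Int) :=
  let lstIndex : List Int :=
    (PySem.List.pyRange 0 (PySem.List.len predictList) 1).foldl
      (fun acc i => if PySem.List.pyGetD predictList i none = none then acc ++ [i] else acc) []
  let st :=
    (PySem.List.pyRange 0 (PySem.List.len predictList) 1).foldl
      (fun (st : List Int × List Int) i =>
        if i ∉ lstIndex then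
          (st.1 ++ [(PySem.List.pyGetD predictList i none).getD 0],
           st.2 ++ [PySem.List.pyGetD actualList i 0])
        else st)
      ([], [])
  [("prediction", st.1), ("actual", st.2)]

-- ===== PORT B =====
-- Two comprehensions: 'prediction' filters the non-None values out of predictList,
-- 'actual' gathers actualList[i] for the enumerate-pairs whose value is not None.
def removeNoneValue_alt (predictList : List (Option Int)) (actualList : List Int) : List (String × List Int) :=
  [("prediction", (predictList.filter (fun p => p.isSome)).map (fun p => p.getD 0)),
   ("actual", ((PySem.List.enumerate predictList).filter (fun ip => ip.2.isSome)).map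
      (fun ip => PySem.List.pyGetD actualList ip.1 0))]

-- ===== PRECONDITION & SPEC =====
-- A raises IndexError on actualList[i] when some non-None prediction index i
-- is out of range for actualList; exactly those inputs are excluded.
def Pre_removeNoneValue (predictList : List (Option Int)) (actualList : List Int) : Prop :=
  ∀ i : Nat, i < predictList.length → predictList[i]! ≠ none → i < actualList.length
instance (predictList : List (Option Int)) (actualList : List Int) : Decidable (Pre_removeNoneValue predictList actualList) := by unfold Pre_removeNoneValue; infer_instance
def pvWitness_removeNoneValue : List (Option Int) × List Int := ([some 1, none, some 3], [5, 6, 7])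
def Spec_removeNoneValue (predictList : List (Option Int)) (actualList : List Int) (out : List (String × List Int)) : Prop := out = removeNoneValue_alt predictList actualList
instance (predictList : List (Option Int)) (actualList : List Int) (out : List (String × List Int)) : Decidable (Spec_removeNoneValue predictList actualList out) := by unfold Spec_removeNoneValue; infer_instance

-- ===== CLAIM (what is proved, stated in full; the proofs are below) =====
def Claim_equal_removeNoneValue : Prop := ∀ (predictList : List (Option Int)) (actualList : List Int), Dom_removeNoneValue predictList actualList → Pre_removeNoneValue predictList actualList → Spec_removeNoneValue predictList actualList (removeNoneValue predictList actualList)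

-- ===== LEMMAS AND PROOFS =====

-- a fold whose step updates the two pair components independently is the pair of folds
theorem foldl_prod_split {α β γ : Type} (g : α → γ → α) (h : β → γ → β) (l : List γ)
    (a : α) (b : β) :
    l.foldl (fun st x => (g st.1 x, h st.2 x)) (a, b) = (l.foldl g a, l.foldl h b) := by
  induction l generalizing a b with
  | nil => rfl
  | cons x xs ih => simpa using ih (g a x) (h b x)

-- A's membership test 'i ∈ lstIndex' is, for i in the range, exactly
-- 'predictList[i] is None'; after rewriting it the fold splits into two
-- append-if folds, i.e. two filter-maps over the index range, which the
-- enumerate/pyGetD bridge lemmas turn into B's comprehensions.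
theorem removeNoneValue_eq_alt (predictList : List (Option Int)) (actualList : List Int) :
    removeNoneValue predictList actualList = removeNoneValue_alt predictList actualList := by
  unfold removeNoneValue removeNoneValue_alt
  rw [PySem.List.foldl_append_ite_eq_filter]
  simp only [List.nil_append]
  have h :
      (PySem.List.pyRange 0 (PySem.List.len predictList) 1).foldl
        (fun (st : List Int × List Int) i =>
          if i ∉ (PySem.List.pyRange 0 (PySem.List.len predictList) 1).filter
                   (fun x => PySem.List.pyGetD predictList x none = none) then
            (st.1 ++ [(PySem.List.pyGetD predictList i none).getD 0],
             st.2 ++ [PySem.List.pyGetD actualList i 0])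
          else st)
        ([], []) =
      ((predictList.filter (fun p => p.isSome)).map (fun p => p.getD 0),
       ((PySem.List.enumerate predictList).filter (fun ip => ip.2.isSome)).map
          (fun ip => PySem.List.pyGetD actualList ip.1 0)) := by
    have hcongr :
        (PySem.List.pyRange 0 (PySem.List.len predictList) 1).foldl
          (fun (st : List Int × List Int) i =>
            if i ∉ (PySem.List.pyRange 0 (PySem.List.len predictList) 1).filter
                     (fun x => PySem.List.pyGetD predictList x none = none) then
              (st.1 ++ [(PySem.List.pyGetD predictList i none).getD 0],
               st.2 ++ [PySem.List.pyGetD actualList i 0])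
            else st)
          ([], []) =
        (PySem.List.pyRange 0 (PySem.List.len predictList) 1).foldl
          (fun (st : List Int × List Int) i =>
            ((fun (acc : List Int) i => if (PySem.List.pyGetD predictList i none).isSome then
                acc ++ [(PySem.List.pyGetD predictList i none).getD 0] else acc) st.1 i,
             (fun (acc : List Int) i => if (PySem.List.pyGetD predictList i none).isSome then
                acc ++ [PySem.List.pyGetD actualList i 0] else acc) st.2 i))
          ([], []) := by
      apply PySem.List.foldl_congr_mem
      intro st i hi
      by_cases hcase : PySem.List.pyGetD predictList i none = none
      · have hmem : i ∈ (PySem.List.pyRange 0 (PySem.List.len predictList) 1).filter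
            (fun x => PySem.List.pyGetD predictList x none = none) :=
          List.mem_filter.mpr ⟨hi, by simp [hcase]⟩
        rw [if_neg (not_not_intro hmem)]
        simp [hcase]
      · simp [List.mem_filter, hcase, Option.isSome_iff_ne_none]
    rw [hcongr,
      foldl_prod_split
        (fun (acc : List Int) i => if (PySem.List.pyGetD predictList i none).isSome then
            acc ++ [(PySem.List.pyGetD predictList i none).getD 0] else acc)
        (fun (acc : List Int) i => if (PySem.List.pyGetD predictList i none).isSome then
            acc ++ [PySem.List.pyGetD actualList i 0] else acc),
      PySem.List.foldl_append_if, PySem.List.foldl_append_if]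
    have hmap : (PySem.List.pyRange 0 (PySem.List.len predictList) 1).map
        (fun j => PySem.List.pyGetD predictList j none) = predictList :=
      PySem.List.map_pyGetD_pyRange_zero ..
    have henum : PySem.List.enumerate predictList 0 =
        (PySem.List.pyRange 0 (PySem.List.len predictList) 1).map
          (fun j => (j, PySem.List.pyGetD predictList j none)) :=
      PySem.List.enumerate_eq_map_pyRange predictList none
    rw [Prod.mk.injEq]
    constructor
    · -- prediction component
      conv_rhs => rw [← hmap]
      rw [List.filter_map, List.map_map]
      rfl
    · -- actual component
      rw [henum, List.filter_map, List.map_map]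
      rfl
  exact (congrArg (fun st : List Int × List Int =>
    [("prediction", st.1), ("actual", st.2)]) h).trans rfl

-- ===== VERDICT (by name: the statement is the Claim_ definition above) =====
theorem removeNoneValue_spec : Claim_equal_removeNoneValue := by
  intro predictList actualList _ _
  exact removeNoneValue_eq_alt predictList actualList
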